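-- pv_equiv track=rewrite | github.com/qizhenkang/myLeetCode | code/Solution_1422_maxScore.py | maxScore
-- ===== SOURCE A (Python) =====
-- def maxScore(s: str) -> int:
--
--     zero_left = 0
--     one_right = 0
--     for i in s:
--         if i == '1':
--             one_right += 1
--
--     max_score = 0
--     for i in s[:-1]:
--         if i == '0':
--             zero_left += 1
--         else:
--             one_right -= 1
--         cur_score = zero_left + one_right
--         max_score = max(max_score, cur_score)
--
--     return max_score
-- ===== SOURCE B (Python) =====
-- def maxScore(s: str) -> int:
--     # On a binary string, the score of cut i is s[:i].count('0') + s[i:].count('1')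
--     # = 2 * s[:i].count('0') + s.count('1') - i.  Evaluate each cut independently.
--     ones = s.count('1')
--     best = 0
--     for i in range(1, len(s)):
--         best = max(best, 2 * s[:i].count('0') + ones - i)
--     return best
-- ===== Notes on version B (the rewrite author's own statement) =====
-- stated objective: alternative
-- what changed: A's single incremental pass with two running accumulators is replaced by evaluating each cut independently via the closed form 2*(zeros in the prefix) + (total ones) - (cut index), rescanning the prefix for each cut and taking a running max over the cut positions.
import Mathlib
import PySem

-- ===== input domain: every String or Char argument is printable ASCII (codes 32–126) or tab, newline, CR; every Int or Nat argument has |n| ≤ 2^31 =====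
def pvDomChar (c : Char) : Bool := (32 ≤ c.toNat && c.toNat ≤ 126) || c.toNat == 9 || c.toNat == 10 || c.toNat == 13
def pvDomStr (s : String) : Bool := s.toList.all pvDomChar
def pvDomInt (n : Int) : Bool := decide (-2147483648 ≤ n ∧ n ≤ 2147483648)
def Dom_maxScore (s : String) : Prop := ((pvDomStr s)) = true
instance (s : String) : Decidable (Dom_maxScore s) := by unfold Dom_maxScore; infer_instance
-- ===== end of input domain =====

-- B replaces A's incremental two-accumulator pass by an independent per-cut evaluation
-- (2 * zeros-in-prefix + total-ones - cut, rescanning the prefix for each cut): an alternative decomposition, not faster.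


-- ===== PORT A =====
-- the body of A's second loop: "if i == '0': zero_left += 1 else: one_right -= 1; max_score = max(...)"
def aStep (st : Int × Int × Int) (c : Char) : Int × Int × Int :=
  let zo := if c = '0' then (st.1 + 1, st.2.1) else (st.1, st.2.1 - 1)
  (zo.1, zo.2, max st.2.2 (zo.1 + zo.2))

-- literal port of A: first loop counts '1's, second loop folds aStep over s[:-1]
def maxScore (s : String) : Int :=
  let one_right : Int := s.toList.foldl (fun acc c => if c = '1' then acc + 1 else acc) 0
  ((PySem.List.slice s.toList none (some (-1))).foldl aStep (0, one_right, 0)).2.2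

-- ===== PORT B =====
-- literal port of Source B (string ops ported on code points, exact): s.count('1') = l.count '1',
-- s[:i] = PySem.List.slice l none (some i); the running max over range(1, len(s))
def maxScore_alt (s : String) : Int :=
  let l := s.toList
  let ones : Int := (l.count '1' : Int)
  (PySem.List.pyRange 1 (l.length : Int) 1).foldl
    (fun best i => max best (2 * ((PySem.List.slice l none (some i)).count '0' : Int) + ones - i)) 0

-- ===== PRECONDITION & SPEC =====
def Spec_maxScore (s : String) (out : Int) : Prop := out = maxScore_alt s
instance (s : String) (out : Int) : Decidable (Spec_maxScore s out) := by unfold Spec_maxScore; infer_instance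

-- ===== CLAIM (what is proved, stated in full; the proofs are below) =====
def Claim_equal_maxScore : Prop := ∀ (s : String), Dom_maxScore s → Spec_maxScore s (maxScore s)

-- ===== LEMMAS AND PROOFS =====

-- A's loop, generalized over the incoming state: its max accumulator equals a running max over
-- the prefix scores z + o + 2*zeros(prefix) - |prefix|.
theorem aLoop (t : List Char) (z o m : Int) :
    (t.foldl aStep (z, o, m)).2.2 =
      (List.range t.length).foldl
        (fun b k => max b (z + o + 2 * (((t.take (k + 1)).count '0' : Int)) - ((k : Int) + 1))) m := by
  induction t generalizing z o m with
  | nil => simp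
  | cons c t ih =>
    simp only [List.foldl_cons, List.length_cons, List.range_succ_eq_map, List.foldl_map,
      List.take_succ_cons, List.count_cons]
    by_cases hc : c = '0'
    · simp only [aStep, hc, ih]
      congr 1
      · funext b k
        simp
        ring_nf
      · simp
        ring_nf
    · simp only [aStep, if_neg hc, ih]
      have hb : (c == '0') = false := by simp [hc]
      congr 1
      · funext b k
        simp [hb]
        ring_nf
      · simp [hb]
        ring_nf

-- B's fold over range(1, n) rewritten as a fold over List.range (n-1) with prefix-take terms.
theorem bLoop (s : String) :
    maxScore_alt s =
      (List.range (s.toList.length - 1)).foldl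
        (fun b k => max b ((s.toList.count '1' : Int)
          + 2 * (((s.toList.take (k + 1)).count '0' : Int)) - ((k : Int) + 1))) 0 := by
  simp only [maxScore_alt, PySem.List.pyRange_one, List.foldl_map]
  have hn : ((s.toList.length : Int) - 1).toNat = s.toList.length - 1 := by omega
  rw [hn]
  apply PySem.List.foldl_congr_mem
  intro b k _
  have h1 : PySem.List.slice s.toList none (some (1 + (k : Int))) = s.toList.take (k + 1) := by
    rw [PySem.List.slice_to s.toList (by omega)]
    congr 1
    omega
  rw [h1]
  ring_nf

-- ===== VERDICT (by name: the statement is the Claim_ definition above) =====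
theorem maxScore_spec : Claim_equal_maxScore := by
  intro s _
  show maxScore s = maxScore_alt s
  rw [bLoop]
  simp only [maxScore, PySem.List.slice_to_neg_one, aLoop,
    PySem.List.foldl_ite_add_one, List.length_dropLast]
  have hc1 : s.toList.countP (fun c => decide (c = '1')) = s.toList.count '1' := by
    have hf : (fun c => decide (c = '1')) = (fun x => x == '1') := by funext c; exact (Bool.beq_eq_decide_eq c '1').symm
    rw [List.count, hf]
  rw [hc1]
  apply PySem.List.foldl_congr_mem
  intro b k hk
  have hk' : k + 1 ≤ s.toList.length - 1 := by
    simp only [List.mem_range] at hk; omega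
  have ht : s.toList.dropLast.take (k + 1) = s.toList.take (k + 1) := by
    rw [List.dropLast_eq_take, List.take_take]
    congr 1
    omega
  rw [ht]
  ring_nf
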